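-- pv_equiv track=rewrite | github.com/aberdichevskaia/catalytic-sites-annotation | downstream_tasks/isoforms_analysis/rank_isoforms_part2.py | choose_reference_isoform
-- ===== SOURCE A (Python) =====
-- from typing import Dict, List, Tuple
--
-- def choose_reference_isoform(iso_ids: List[str]) -> str:
--     iso_ids = sorted(set(iso_ids))
--     for x in iso_ids:
--         if x.endswith("-1"):
--             return x
--
--     def iso_num(x: str) -> Tuple[int, str]:
--         if "-" in x:
--             suf = x.split("-", 1)[1]
--             try:
--                 return (int(suf), x)
--             except Exception:
--                 pass
--         return (10**9, x)
--
--     return sorted(iso_ids, key=iso_num)[0]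
-- ===== SOURCE B (Python) =====
-- def _iso_num(x: str) -> int:
--     if "-" in x:
--         try:
--             return int(x.split("-", 1)[1])
--         except ValueError:
--             pass
--     return 10**9
--
--
-- def choose_reference_isoform(iso_ids):
--     best_dash = None
--     best = None
--     for x in iso_ids:
--         if x.endswith("-1") and (best_dash is None or x < best_dash):
--             best_dash = x
--         if best is None or (_iso_num(x), x) < (_iso_num(best), best):
--             best = x
--     if best_dash is not None:
--         return best_dash
--     if best is None:
--         raise IndexError("list index out of range")
--     return best
-- ===== Notes on version B (the rewrite author's own statement) =====
-- stated objective: alternative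
-- what changed: Single explicit left-to-right loop over the raw (undeduped, unsorted) input keeping two running minima - the lex-least '-1'-suffixed id and the least id under the (suffix-number, id) key - instead of A's sort of the deduped set, linear scan, and second keyed sort.
import Mathlib
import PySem

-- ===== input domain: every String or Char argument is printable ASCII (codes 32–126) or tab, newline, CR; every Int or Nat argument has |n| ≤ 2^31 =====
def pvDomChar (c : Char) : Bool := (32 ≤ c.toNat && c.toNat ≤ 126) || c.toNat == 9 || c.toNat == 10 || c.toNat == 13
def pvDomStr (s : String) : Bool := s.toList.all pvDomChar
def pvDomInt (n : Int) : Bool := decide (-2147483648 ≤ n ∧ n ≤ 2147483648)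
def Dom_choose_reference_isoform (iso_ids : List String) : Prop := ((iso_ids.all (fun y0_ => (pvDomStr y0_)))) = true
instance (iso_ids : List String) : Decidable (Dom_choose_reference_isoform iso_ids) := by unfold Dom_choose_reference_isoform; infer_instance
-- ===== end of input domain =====

-- B replaces A's sort-scan-sort over the deduped set with one explicit loop over the raw list
-- keeping two running minima (objective: alternative). Equal wherever A returns.

-- ===== PORT A =====
-- iso_num(x): (int(suffix after first '-') if it parses, else 10**9, x)
def isoNumA (x : String) : Int × String :=
  if PySem.Str.isIn "-" x then
    match PySem.Int.ofStr? (((PySem.Str.splitMax? x "-" 1).getD []).getD 1 "") with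
    | some n => (n, x)
    | none => (1000000000, x)
  else (1000000000, x)

def choose_reference_isoform (iso_ids : List String) : String :=
  let ids := PySem.List.sorted (PySem.Set.ofList iso_ids) (fun x => x) false
  match ids.find? (fun x => PySem.Str.endswith x "-1") with
  | some x => x
  | none =>
      (PySem.List.pyGet?
        (PySem.List.sorted2 ids (fun x => (isoNumA x).1) (fun x => (isoNumA x).2) false)
        0).getD ""

-- ===== PORT B =====
-- _iso_num(x): the parsed post-dash integer, else 10**9
def isoNumB (x : String) : Int :=
  if PySem.Str.isIn "-" x then
    match PySem.Int.ofStr? (((PySem.Str.splitMax? x "-" 1).getD []).getD 1 "") with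
    | some n => n
    | none => 1000000000
  else 1000000000

-- one loop, two running minima (best_dash, best); tuple '<' transliterated componentwise
def altStep (st : Option String × Option String) (x : String) : Option String × Option String :=
  let bd := if PySem.Str.endswith x "-1" &&
               (match st.1 with | none => true | some b => decide (x < b))
            then some x else st.1
  let bb := match st.2 with
    | none => some x
    | some b =>
        if decide (isoNumB x < isoNumB b) ||
           (decide (isoNumB x = isoNumB b) && decide (x < b))
        then some x else some b
  (bd, bb)

def choose_reference_isoform_alt (iso_ids : List String) : String :=
  let st := iso_ids.foldl altStep (none, none)
  match st.1 with
  | some d => d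
  | none => st.2.getD ""

-- ===== PRECONDITION & SPEC =====
-- Pre_ excludes only the empty list, on which A raises IndexError (sorted(...)[0]) and B raises IndexError too.
def Pre_choose_reference_isoform (iso_ids : List String) : Prop := iso_ids ≠ []
instance (iso_ids : List String) : Decidable (Pre_choose_reference_isoform iso_ids) := by
  unfold Pre_choose_reference_isoform; infer_instance

def pvWitness_choose_reference_isoform : List String := ["P1-2", "P1-1"]

def Spec_choose_reference_isoform (iso_ids : List String) (out : String) : Prop := out = choose_reference_isoform_alt iso_ids
instance (iso_ids : List String) (out : String) : Decidable (Spec_choose_reference_isoform iso_ids out) := by unfold Spec_choose_reference_isoform; infer_instance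

-- ===== CLAIM (what is proved, stated in full; the proofs are below) =====
def Claim_equal_choose_reference_isoform : Prop := ∀ (iso_ids : List String), Dom_choose_reference_isoform iso_ids → Pre_choose_reference_isoform iso_ids → Spec_choose_reference_isoform iso_ids (choose_reference_isoform iso_ids)

-- ===== LEMMAS AND PROOFS =====

lemma isoNumA_snd (x : String) : (isoNumA x).2 = x := by
  unfold isoNumA; split
  · split <;> rfl
  · rfl

lemma isoNumA_fst (x : String) : (isoNumA x).1 = isoNumB x := by
  unfold isoNumA isoNumB; split
  · split <;> simp_all
  · rfl

-- the three-way comparator '(k1 a < k1 b) || (!(k1 b < k1 a) && k2 a < k2 b)' is the lex order on toLex (k1 ·, k2 ·)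
lemma lt2_eq_lex {α : Type} (k1 : α → Int) (k2 : α → String) (a b : α) :
    (decide (k1 a < k1 b) || !decide (k1 b < k1 a) && decide (k2 a < k2 b)) =
      decide (toLex (k1 a, k2 a) < toLex (k1 b, k2 b)) := by
  rcases lt_trichotomy (k1 a) (k1 b) with h | h | h
  · simp [Prod.Lex.lt_iff, h]
  · simp [Prod.Lex.lt_iff, h]
  · simp [Prod.Lex.lt_iff, h, lt_asymm h, h.ne']

-- B's transliterated tuple comparison is the same lex order
lemma ltTuple_eq_lex (x b : String) :
    (decide (isoNumB x < isoNumB b) || (decide (isoNumB x = isoNumB b) && decide (x < b))) =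
      decide ((toLex (isoNumB x, x) : Lex (Int × String)) < toLex (isoNumB b, b)) := by
  rcases lt_trichotomy (isoNumB x) (isoNumB b) with h | h | h
  · simp [Prod.Lex.lt_iff, h]
  · simp [Prod.Lex.lt_iff, h]
  · simp [Prod.Lex.lt_iff, lt_asymm h, h.ne']

lemma sorted2_eq_sorted_lex {α : Type} (xs : List α) (k1 : α → Int) (k2 : α → String) :
    PySem.List.sorted2 xs k1 k2 false =
      PySem.List.sorted xs (fun x => toLex (k1 x, k2 x)) false := by
  unfold PySem.List.sorted2 PySem.List.sorted
  simp only [if_neg (by decide : ¬ (false = true))]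
  congr 1
  funext acc x
  congr 1
  funext a b
  exact lt2_eq_lex k1 k2 a b

-- splitting B's product fold into the two independent accumulators
def dashStep (acc : Option String) (x : String) : Option String :=
  if PySem.Str.endswith x "-1" &&
       (match acc with | none => true | some b => decide (x < b))
  then some x else acc

def bestStep (acc : Option String) (x : String) : Option String :=
  match acc with
  | none => some x
  | some b =>
      if decide (isoNumB x < isoNumB b) ||
         (decide (isoNumB x = isoNumB b) && decide (x < b))
      then some x else some b

lemma foldl_altStep_split (l : List String) (d b : Option String) :
    l.foldl altStep (d, b) = (l.foldl dashStep d, l.foldl bestStep b) := by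
  induction l generalizing d b with
  | nil => rfl
  | cons x t ih => simpa [altStep, dashStep, bestStep] using ih _ _

-- a guarded keep-the-smaller loop is the strict-min fold of the filtered list (generic predicate)
lemma foldl_guard_min (P : String → Bool) (l : List String) (acc : Option String) :
    l.foldl (fun acc x =>
        if P x && (match acc with | none => true | some b => decide (x < b))
        then some x else acc) acc =
      (l.filter P).foldl (fun acc x =>
        match acc with
        | none => some x
        | some m => if x < m then some x else some m) acc := by
  induction l generalizing acc with
  | nil => rfl
  | cons x t ih =>
    rw [List.foldl_cons, List.filter_cons]
    by_cases hx : P x = true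
    · rw [if_pos hx, List.foldl_cons, ih]
      congr 1
      cases acc with
      | none => simp [hx]
      | some b => by_cases hlt : x < b <;> simp [hx, hlt]
    · rw [if_neg hx, ih]
      congr 1
      simp [hx]

-- the dash accumulator is min? of the '-1'-filtered list under the identity key
lemma foldl_dashStep_min? (l : List String) :
    l.foldl dashStep none =
      PySem.List.min? (l.filter (fun x => PySem.Str.endswith x "-1")) (fun y => y) := by
  have h := foldl_guard_min (fun x => PySem.Str.endswith x "-1") l none
  rw [show dashStep = (fun acc x =>
        if PySem.Str.endswith x "-1" && (match acc with | none => true | some b => decide (x < b))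
        then some x else acc) from rfl, h]
  unfold PySem.List.min?
  congr 1
  funext acc x
  cases acc with
  | none => rfl
  | some m => by_cases hm : x < m <;> simp [hm]

-- the best accumulator is min? under the lex key
lemma foldl_bestStep_min? (l : List String) :
    l.foldl bestStep none =
      PySem.List.min? l (fun x => (toLex (isoNumB x, x) : Lex (Int × String))) := by
  show l.foldl bestStep none = l.foldl _ none
  congr 1
  funext acc x
  cases acc with
  | none => rfl
  | some b =>
    show (if (decide (isoNumB x < isoNumB b) || (decide (isoNumB x = isoNumB b) && decide (x < b))) = true
        then some x else some b) =
      (if (toLex (isoNumB x, x) : Lex (Int × String)) < toLex (isoNumB b, b) then some x else some b)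
    rw [ltTuple_eq_lex x b]
    simp

-- on a strictly increasing list, the first element satisfying p is ≤ every element satisfying p
lemma find?_pairwise_min {l : List String} (hp : l.Pairwise (· < ·)) {p : String → Bool} {m : String}
    (h : l.find? p = some m) : ∀ y ∈ l, p y = true → m ≤ y := by
  induction l with
  | nil => simp at h
  | cons a t ih =>
    rcases List.pairwise_cons.mp hp with ⟨ha, ht⟩
    cases hpa : p a with
    | true =>
      simp only [List.find?_cons, hpa] at h
      obtain rfl : a = m := by injection h
      intro y hy _
      rcases List.mem_cons.mp hy with rfl | hyt
      · exact le_refl _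
      · exact le_of_lt (ha y hyt)
    | false =>
      simp only [List.find?_cons, hpa] at h
      intro y hy hpy
      rcases List.mem_cons.mp hy with rfl | hyt
      · simp [hpy] at hpa
      · exact ih ht h y hyt hpy

lemma lexKey_inj (a b : String) (na nb : Int)
    (h : (toLex (na, a) : Lex (Int × String)) = toLex (nb, b)) : a = b := by
  have := congrArg (fun p => (ofLex p).2) h
  simpa using this

-- ===== VERDICT (by name: the statement is the Claim_ definition above) =====
theorem choose_reference_isoform_spec : Claim_equal_choose_reference_isoform := by
  intro iso_ids _ hpre
  unfold Spec_choose_reference_isoform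
  simp only [choose_reference_isoform, choose_reference_isoform_alt]
  rw [foldl_altStep_split, foldl_dashStep_min?, foldl_bestStep_min?]
  set S := PySem.Set.ofList iso_ids with hS
  set L := PySem.List.sorted S (fun x => x) false with hL
  have hmemL : ∀ x, x ∈ L ↔ x ∈ S := fun x => PySem.List.mem_sorted S (fun x => x) false x
  have hmemS : ∀ x, x ∈ S ↔ x ∈ iso_ids := fun x => PySem.Set.mem_ofList iso_ids x
  have hSne : S ≠ [] := by
    cases iso_ids with
    | nil => exact absurd rfl hpre
    | cons h t =>
      intro hnil
      have : h ∈ S := (hmemS h).mpr List.mem_cons_self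
      simp [hnil] at this
  set P := fun x => PySem.Str.endswith x "-1" with hP
  set K := fun x : String => (toLex (isoNumB x, x) : Lex (Int × String)) with hK
  by_cases hd : ∃ x ∈ iso_ids, P x = true
  · -- some id ends with '-1': A's find? hits the smallest one, B's loop min matches
    have hfind : (L.find? P).isSome := List.find?_isSome.mpr
      (by rcases hd with ⟨x, hx, hpx⟩; exact ⟨x, (hmemL x).mpr ((hmemS x).mpr hx), hpx⟩)
    cases hf : L.find? P with
    | none => rw [hf] at hfind; simp at hfind
    | some m =>
      have hpw : L.Pairwise (· < ·) := PySem.List.sorted_ofList_pairwise_lt iso_ids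
      have hmL : m ∈ L := List.mem_of_find?_eq_some hf
      have hpm : P m = true := List.find?_some hf
      have hmmin : ∀ y ∈ L, P y = true → m ≤ y := find?_pairwise_min hpw hf
      cases hmin : PySem.List.min? (iso_ids.filter P) (fun y => y) with
      | none =>
        have := (PySem.List.min?_eq_none_iff _ _).mp hmin
        rcases hd with ⟨x, hx, hpx⟩
        have : x ∈ iso_ids.filter P := List.mem_filter.mpr ⟨hx, hpx⟩
        simp_all
      | some m' =>
        have hm'f : m' ∈ iso_ids.filter P := PySem.List.min?_mem hmin
        have hm'min : ∀ y ∈ iso_ids.filter P, m' ≤ y := PySem.List.min?_isMin hmin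
        have h1 : m ≤ m' := hmmin m' ((hmemL m').mpr ((hmemS m').mpr (List.mem_of_mem_filter hm'f)))
          (List.of_mem_filter hm'f)
        have h2 : m' ≤ m := hm'min m (List.mem_filter.mpr
          ⟨(hmemS m).mp ((hmemL m).mp hmL), hpm⟩)
        simp [le_antisymm h1 h2]
  · -- no '-1' id: A's find? is none, B's dash minimum is none; both take the key-minimum
    push Not at hd
    have hfind : L.find? P = none := List.find?_eq_none.mpr
      (fun x hx => by simpa using hd x ((hmemS x).mp ((hmemL x).mp hx)))
    have hfilt : iso_ids.filter P = [] := List.filter_eq_nil_iff.mpr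
      (fun x hx => by simpa using hd x hx)
    rw [hfind, hfilt]
    have hk2 : (fun x => (isoNumA x).2) = (fun x : String => x) := funext isoNumA_snd
    have hk1 : (fun x => (isoNumA x).1) = isoNumB := funext isoNumA_fst
    rw [hk1, hk2, sorted2_eq_sorted_lex]
    have hLne : L ≠ [] := fun h => hSne ((PySem.List.sorted_eq_nil_iff _ _ _).mp h)
    cases hsl : PySem.List.sorted L K false with
    | nil => exact absurd ((PySem.List.sorted_eq_nil_iff _ _ _).mp hsl) hLne
    | cons m t =>
      have hmL : m ∈ L := (PySem.List.mem_sorted L K false m).mp (hsl ▸ List.mem_cons_self)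
      have hmmin : ∀ y ∈ L, K m ≤ K y := PySem.List.key_head_sorted_le L K hsl
      cases hmin : PySem.List.min? iso_ids K with
      | none =>
        have := (PySem.List.min?_eq_none_iff _ _).mp hmin
        exact absurd this hpre
      | some m' =>
        have hm'mem : m' ∈ iso_ids := PySem.List.min?_mem hmin
        have hm'min : ∀ y ∈ iso_ids, K m' ≤ K y := PySem.List.min?_isMin hmin
        have h1 : K m ≤ K m' := hmmin m' ((hmemL m').mpr ((hmemS m').mpr hm'mem))
        have h2 : K m' ≤ K m := hm'min m ((hmemS m).mp ((hmemL m).mp hmL))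
        have : m = m' := lexKey_inj m m' _ _ (le_antisymm h1 h2)
        simp [PySem.List.pyGet?, PySem.List.pyIdx?, PySem.List.min?, this]
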